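-- pv_equiv track=rewrite | github.com/taechanha/PS | removeByPair.py | solution
-- ===== SOURCE A (Python) =====
-- def solution(s):
--     i = 0
--     len_s = len(s)
--     s = list(s)
--     while s and i < len_s - 1:
--         if s[i] == s[i+1]:
--             s.pop(i)
--             s.pop(i)
--             i = 0
--             len_s = len(s)
--             continue
--
--         i += 1
--         len_s = len(s)
--
--     return s == []
-- ===== SOURCE B (Python) =====
-- def solution(s):
--     st = []
--     for c in s:
--         if st and st[-1] == c:
--             st.pop()
--         else:
--             st.append(c)
--     return not st
-- ===== Notes on version B (the rewrite author's own statement) =====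
-- stated objective: faster
-- what changed: Replaced the restart-from-zero scan-and-delete loop with a single-pass stack that cancels each character against the stack top, so the quadratic rescans disappear.
import Mathlib
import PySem

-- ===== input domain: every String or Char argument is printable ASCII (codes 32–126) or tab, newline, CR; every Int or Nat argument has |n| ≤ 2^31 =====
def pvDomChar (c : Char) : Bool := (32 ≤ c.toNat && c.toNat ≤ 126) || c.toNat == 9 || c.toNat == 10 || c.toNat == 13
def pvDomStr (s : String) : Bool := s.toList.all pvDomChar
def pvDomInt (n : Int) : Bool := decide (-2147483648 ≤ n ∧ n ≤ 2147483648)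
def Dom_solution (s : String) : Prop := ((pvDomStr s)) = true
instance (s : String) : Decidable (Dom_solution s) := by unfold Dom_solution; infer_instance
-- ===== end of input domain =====

-- B replaces A's restart-from-zero scan-and-delete loop with a one-pass stack (faster: asymptotic, O(n^2) -> O(n)).

-- ===== PORT A =====
-- A's while loop: i, len_s, and the mutable char list; `len_s` always equals the
-- current list length, so it is not carried separately.  The two `pop(i)` calls
-- (indices in range, guarded by i < len_s - 1) are the two `eraseIdx i`.
def solutionLoop (s : List Char) (i : Nat) : Bool :=
  if h : s ≠ [] ∧ i < s.length - 1 then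
    if s[i]! = s[i+1]! then
      solutionLoop ((s.eraseIdx i).eraseIdx i) 0
    else
      solutionLoop s (i+1)
  else
    decide (s = [])
termination_by (s.length, s.length - i)
decreasing_by
  · apply Prod.Lex.left
    have h1 : i < s.length := by omega
    have : (s.eraseIdx i).length = s.length - 1 := List.length_eraseIdx_of_lt h1
    have h2 : i < (s.eraseIdx i).length := by omega
    have := List.length_eraseIdx_of_lt h2
    omega
  · apply Prod.Lex.right
    omega

def solution (s : String) : Bool := solutionLoop s.toList 0

-- ===== PORT B =====
-- one step of the stack loop: pop on match with the top, otherwise push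
def stepB (st : List Char) (c : Char) : List Char :=
  match st with
  | t :: r => if t = c then r else c :: t :: r
  | [] => [c]

def solution_alt (s : String) : Bool := (s.toList.foldl stepB []).isEmpty

-- ===== PRECONDITION & SPEC =====
def Spec_solution (s : String) (out : Bool) : Prop := out = solution_alt s
instance (s : String) (out : Bool) : Decidable (Spec_solution s out) := by unfold Spec_solution; infer_instance

-- ===== CLAIM (what is proved, stated in full; the proofs are below) =====
def Claim_equal_solution : Prop := ∀ (s : String), Dom_solution s → Spec_solution s (solution s)

-- ===== LEMMAS AND PROOFS =====

-- the stack never holds two equal adjacent characters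
theorem stepB_chain' {st : List Char} (h : List.IsChain Ne st) (c : Char) :
    List.IsChain Ne (stepB st c) := by
  cases st with
  | nil => simp [stepB]
  | cons t r =>
    by_cases htc : t = c
    · simpa [stepB, htc] using h.tail
    · exact (by simpa [stepB, htc] using List.isChain_cons_cons.mpr ⟨fun h' => htc h'.symm, h⟩)

theorem foldl_stepB_chain' (l : List Char) :
    ∀ st : List Char, List.IsChain Ne st → List.IsChain Ne (List.foldl stepB st l) := by
  induction l with
  | nil => intro st h; simpa using h
  | cons c t ih => intro st h; exact ih _ (stepB_chain' h c)

-- pushing the same character twice onto a pairless stack is a no-op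
theorem stepB_stepB {st : List Char} (h : List.IsChain Ne st) (c : Char) :
    stepB (stepB st c) c = st := by
  cases st with
  | nil => simp [stepB]
  | cons t r =>
    by_cases htc : t = c
    · subst htc
      cases r with
      | nil => simp [stepB]
      | cons t' r' =>
        have ht' : t ≠ t' := List.rel_of_isChain_cons_cons h
        have : t' ≠ t := fun h' => ht' h'.symm
        simp [stepB, this]
    · simp [stepB, htc]

-- removing an adjacent equal pair does not change the stack result
theorem foldl_stepB_pair (u v : List Char) (c : Char) :
    List.foldl stepB [] (u ++ c :: c :: v) = List.foldl stepB [] (u ++ v) := by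
  have hch : List.IsChain Ne (List.foldl stepB ([] : List Char) u) :=
    foldl_stepB_chain' u [] (by simp)
  simp only [List.foldl_append, List.foldl_cons]
  rw [stepB_stepB hch]

-- on a pairless string the stack just accumulates everything
theorem foldl_stepB_pairless (l : List Char) :
    ∀ st : List Char, List.IsChain Ne (l.reverse ++ st) →
      List.foldl stepB st l = l.reverse ++ st := by
  induction l with
  | nil => intro st _; simp
  | cons c t ih =>
    intro st h
    have h' : List.IsChain Ne (t.reverse ++ (c :: st)) := by
      simpa using h
    have hstep : stepB st c = c :: st := by
      cases st with
      | nil => simp [stepB]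
      | cons a r =>
        have hca : c ≠ a := ((List.isChain_append.mp h').2.1).rel_head
        have : a ≠ c := fun h'' => hca h''.symm
        simp [stepB, this]
    calc List.foldl stepB st (c :: t)
        = List.foldl stepB (c :: st) t := by rw [List.foldl_cons, hstep]
      _ = t.reverse ++ (c :: st) := ih _ h'
      _ = (c :: t).reverse ++ st := by simp

theorem solutionLoop_eq (s : List Char) (i : Nat)
    (hpre : ∀ j, j < i → j + 1 < s.length → s[j]! ≠ s[j+1]!) :
    solutionLoop s i = decide (List.foldl stepB [] s = []) := by
  fun_induction solutionLoop s i with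
  | case1 s i h heq ih =>
    -- pop-pop branch: s = take i ++ c :: c :: drop (i+2)
    have hlen : i + 1 < s.length := by omega
    have hi : i < s.length := by omega
    have hE1 : s.eraseIdx i = s.take i ++ s.drop (i+1) :=
      List.eraseIdx_eq_take_drop_succ s i
    have hlen_take : (s.take i).length = i := List.length_take_of_le (by omega)
    have hE2 : (s.eraseIdx i).eraseIdx i = s.take i ++ s.drop (i+2) := by
      rw [hE1, List.eraseIdx_eq_take_drop_succ]
      rw [List.take_append_of_le_length (by omega), List.take_take,
        List.drop_append]
      simp [hlen_take, List.drop_drop]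
    have hdecomp : s = s.take i ++ s[i]! :: s[i+1]! :: s.drop (i+2) := by
      have h1 : s[i]! = s[i] := getElem!_pos s i hi
      have h2 : s[i+1]! = s[i+1] := getElem!_pos s (i+1) hlen
      rw [h1, h2]
      conv_lhs => rw [← List.take_append_drop i s]
      congr 1
      rw [List.drop_eq_getElem_cons hi]
      congr 1
      rw [List.drop_eq_getElem_cons hlen]
    have hred : List.foldl stepB [] s = List.foldl stepB [] ((s.eraseIdx i).eraseIdx i) := by
      conv_lhs => rw [hdecomp]
      rw [heq, hE2]
      exact foldl_stepB_pair _ _ _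
    rw [ih (by omega), hred]
  | case2 s i h heq ih =>
    apply ih
    intro j hj hjl
    rcases Nat.lt_or_ge j i with hji | hji
    · exact hpre j hji hjl
    · have : j = i := by omega
      subst this
      exact heq
  | case3 s i h =>
    by_cases hs : s = []
    · subst hs; simp
    · have hil : s.length - 1 ≤ i := by
        rcases not_and_or.mp h with h1 | h2
        · exact absurd hs (by simpa using h1)
        · omega
      have hch : List.IsChain Ne s := by
        rw [List.isChain_iff_getElem]
        intro j hjl
        have := hpre j (by omega) (by omega)
        rwa [getElem!_pos s j (by omega), getElem!_pos s (j+1) (by omega)] at this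
      have : List.foldl stepB [] s = s.reverse := by
        have hrev : List.IsChain Ne s.reverse :=
          List.isChain_reverse.mpr (hch.imp_of_mem_imp (fun a b _ _ hab => hab.symm))
        have := foldl_stepB_pairless s [] (by simpa using hrev)
        simpa using this
      rw [this]
      simp [hs]

-- ===== VERDICT (by name: the statement is the Claim_ definition above) =====
theorem solution_spec : Claim_equal_solution := by
  intro s _
  unfold Spec_solution solution solution_alt
  rw [solutionLoop_eq s.toList 0 (by omega)]
  cases h : List.foldl stepB [] s.toList <;> simp
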